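-- pv_equiv track=rewrite | github.com/nivedvc/job_search_project | test.py | get_exp_sal_loc
-- ===== SOURCE A (Python) =====
-- def get_exp_sal_loc(details):
--     req_data = {
--         'experience': None,
--         'salary': None,
--         'location': None
--     }
--     for item in details:
--         name = item.get('type')
--         if name in req_data:
--             req_data[name] = item.get('label')
--     return req_data
-- ===== SOURCE B (Python) =====
-- def get_exp_sal_loc(details):
--     # For each fixed key, scan backwards and return the label of the
--     # first matching item (= last occurrence in original order), else None.
--     def last_label(key):
--         for item in reversed(details):
--             if item.get('type') == key:
--                 return item.get('label')
--         return None
--     return {k: last_label(k) for k in ('experience', 'salary', 'location')}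
-- ===== Notes on version B (the rewrite author's own statement) =====
-- stated objective: alternative
-- what changed: A makes one forward pass mutating a pre-seeded dict with an in-loop membership filter; B uses no dict at all: for each of the three fixed keys it scans the list backwards and early-exits at the first match (= last occurrence).
import Mathlib
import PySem

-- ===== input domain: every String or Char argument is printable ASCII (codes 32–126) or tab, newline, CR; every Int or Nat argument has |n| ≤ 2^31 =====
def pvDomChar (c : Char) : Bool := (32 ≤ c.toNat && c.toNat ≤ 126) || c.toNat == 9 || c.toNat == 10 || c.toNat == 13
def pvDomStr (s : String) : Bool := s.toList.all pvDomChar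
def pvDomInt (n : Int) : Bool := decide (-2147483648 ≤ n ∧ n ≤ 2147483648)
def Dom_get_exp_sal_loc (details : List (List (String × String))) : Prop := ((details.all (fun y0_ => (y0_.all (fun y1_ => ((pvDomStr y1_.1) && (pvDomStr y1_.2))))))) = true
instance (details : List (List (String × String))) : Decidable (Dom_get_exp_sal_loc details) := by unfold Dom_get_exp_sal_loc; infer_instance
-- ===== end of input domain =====

-- B replaces A's forward dict-mutating pass by three backward early-exit scans (no dict); alternative algorithm, same cost.

-- ===== PORT A =====
-- A's loop body: if name := item.get('type') is a key of req_data, overwrite req_data[name] with item.get('label')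
def pvAstep (d : PySem.Dict String (Option String)) (item : List (String × String)) : PySem.Dict String (Option String) :=
  match (PySem.Dict.mk item).get? "type" with
  | some name =>
      if d.contains name then d.insert name ((PySem.Dict.mk item).get? "label") else d
  | none => d

def get_exp_sal_loc (details : List (List (String × String))) : List (String × Option String) :=
  let req0 : PySem.Dict String (Option String) :=
    PySem.Dict.mk [("experience", none), ("salary", none), ("location", none)]
  let req := details.foldl pvAstep req0
  req.items

-- ===== PORT B =====
-- B's inner loop: 'for item in reversed(details): if item.get('type') == key: return item.get('label')' / 'return None'
def pvLastLabel (key : String) : List (List (String × String)) → Option String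
  | [] => none
  | item :: rest =>
      if (PySem.Dict.mk item).get? "type" == some key then (PySem.Dict.mk item).get? "label"
      else pvLastLabel key rest

def get_exp_sal_loc_alt (details : List (List (String × String))) : List (String × Option String) :=
  ["experience", "salary", "location"].map (fun k => (k, pvLastLabel k details.reverse))

-- ===== PRECONDITION & SPEC =====
def Spec_get_exp_sal_loc (details : List (List (String × String))) (out : List (String × Option String)) : Prop := out = get_exp_sal_loc_alt details
instance (details : List (List (String × String))) (out : List (String × Option String)) : Decidable (Spec_get_exp_sal_loc details out) := by unfold Spec_get_exp_sal_loc; infer_instance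

-- ===== CLAIM (what is proved, stated in full; the proofs are below) =====
def Claim_equal_get_exp_sal_loc : Prop := ∀ (details : List (List (String × String))), Dom_get_exp_sal_loc details → Spec_get_exp_sal_loc details (get_exp_sal_loc details)

-- ===== LEMMAS AND PROOFS =====

-- the value A's loop leaves at key k: label of the last item with type == k, else the start value v
def pvUpd (v : Option String) (k : String) (details : List (List (String × String))) : Option String :=
  details.foldl (fun v item =>
    if (PySem.Dict.mk item).get? "type" == some k then (PySem.Dict.mk item).get? "label" else v) v

-- first match in a list, wrapped so that "found with label none" is distinguished from "not found"
def pvFind? (k : String) : List (List (String × String)) → Option (Option String)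
  | [] => none
  | item :: rest =>
      if (PySem.Dict.mk item).get? "type" == some k then some ((PySem.Dict.mk item).get? "label")
      else pvFind? k rest

theorem pvLastLabel_eq_find (k : String) (l : List (List (String × String))) :
    pvLastLabel k l = (pvFind? k l).getD none := by
  induction l with
  | nil => rfl
  | cons item rest ih =>
    simp only [pvLastLabel, pvFind?]
    split <;> simp [ih]

theorem pvFind?_append (k : String) (xs ys : List (List (String × String))) :
    pvFind? k (xs ++ ys) = (pvFind? k xs).orElse (fun _ => pvFind? k ys) := by
  induction xs with
  | nil => rfl
  | cons item rest ih =>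
    simp only [List.cons_append, pvFind?]
    split <;> simp [ih]

theorem pvUpd_eq_find (k : String) (details : List (List (String × String))) (v : Option String) :
    pvUpd v k details = (pvFind? k details.reverse).getD v := by
  induction details generalizing v with
  | nil => rfl
  | cons item rest ih =>
    simp only [pvUpd, List.foldl_cons, List.reverse_cons, pvFind?_append]
    rw [show (rest.foldl (fun v item =>
        if (PySem.Dict.mk item).get? "type" == some k then (PySem.Dict.mk item).get? "label" else v)
        (if (PySem.Dict.mk item).get? "type" == some k then (PySem.Dict.mk item).get? "label" else v))
        = pvUpd (if (PySem.Dict.mk item).get? "type" == some k then (PySem.Dict.mk item).get? "label" else v) k rest from rfl,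
      ih]
    cases h : pvFind? k rest.reverse
    · simp only [pvFind?, Option.orElse]
      split <;> rfl
    · simp [Option.orElse]

theorem pvStep_found (a b c : Option String) (k : String) (v : Option String)
    (hk : k = "experience" ∨ k = "salary" ∨ k = "location") :
    (if (PySem.Dict.mk [("experience", a), ("salary", b), ("location", c)]).contains k = true
     then (PySem.Dict.mk [("experience", a), ("salary", b), ("location", c)]).insert k v
     else PySem.Dict.mk [("experience", a), ("salary", b), ("location", c)]) =
    PySem.Dict.mk [("experience", if k = "experience" then v else a),
                   ("salary", if k = "salary" then v else b),
                   ("location", if k = "location" then v else c)] := by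
  rcases hk with h | h | h <;> subst h <;>
    simp [PySem.Dict.contains, PySem.Dict.insert]

theorem pvStep_notfound (a b c : Option String) (k : String) (v : Option String)
    (h1 : k ≠ "experience") (h2 : k ≠ "salary") (h3 : k ≠ "location") :
    (if (PySem.Dict.mk [("experience", a), ("salary", b), ("location", c)]).contains k = true
     then (PySem.Dict.mk [("experience", a), ("salary", b), ("location", c)]).insert k v
     else PySem.Dict.mk [("experience", a), ("salary", b), ("location", c)]) =
    PySem.Dict.mk [("experience", a), ("salary", b), ("location", c)] := by
  have : (PySem.Dict.mk [("experience", a), ("salary", b), ("location", c)]).contains k = false := by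
    simp [PySem.Dict.contains]
    exact ⟨Ne.symm h1, Ne.symm h2, Ne.symm h3⟩
  simp [this]

theorem pvA_fold (details : List (List (String × String))) (a b c : Option String) :
    details.foldl pvAstep
      (PySem.Dict.mk [("experience", a), ("salary", b), ("location", c)]) =
    PySem.Dict.mk [("experience", pvUpd a "experience" details),
                   ("salary", pvUpd b "salary" details),
                   ("location", pvUpd c "location" details)] := by
  induction details generalizing a b c with
  | nil => simp [pvUpd]
  | cons item rest ih =>
    simp only [List.foldl_cons]
    cases h : (PySem.Dict.mk item).get? "type" with
    | none =>
      rw [show pvAstep (PySem.Dict.mk [("experience", a), ("salary", b), ("location", c)]) item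
            = PySem.Dict.mk [("experience", a), ("salary", b), ("location", c)] from by
          simp [pvAstep, h], ih]
      simp [pvUpd, h]
    | some name =>
      rw [show pvAstep (PySem.Dict.mk [("experience", a), ("salary", b), ("location", c)]) item
            = (if (PySem.Dict.mk [("experience", a), ("salary", b), ("location", c)]).contains name = true
               then (PySem.Dict.mk [("experience", a), ("salary", b), ("location", c)]).insert name ((PySem.Dict.mk item).get? "label")
               else PySem.Dict.mk [("experience", a), ("salary", b), ("location", c)]) from by
          simp [pvAstep, h]]
      by_cases hk : name = "experience" ∨ name = "salary" ∨ name = "location"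
      · rw [pvStep_found a b c name _ hk, ih]
        simp only [pvUpd, List.foldl_cons, h]
        rcases hk with hh | hh | hh <;> subst hh <;> norm_num
      · push Not at hk
        rw [pvStep_notfound a b c name _ hk.1 hk.2.1 hk.2.2, ih]
        simp only [pvUpd, List.foldl_cons, h]
        have : ∀ k : String, name ≠ k → (some name == some k) = false := by
          intro k e; simp [e]
        rw [this _ hk.1, this _ hk.2.1, this _ hk.2.2]
        simp

-- ===== VERDICT (by name: the statement is the Claim_ definition above) =====
theorem get_exp_sal_loc_spec : Claim_equal_get_exp_sal_loc := by
  intro details _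
  show get_exp_sal_loc details = get_exp_sal_loc_alt details
  unfold get_exp_sal_loc get_exp_sal_loc_alt
  simp only [pvA_fold, List.map_cons, List.map_nil, pvLastLabel_eq_find, ← pvUpd_eq_find]
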